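-- pv_equiv track=rewrite | github.com/GuillaumeCz/adventOfCode2025 | day6/day6.py | part_1
-- ===== SOURCE A (Python) =====
-- def part_1(matrice, operations):
--     solution = 0
--     cols = []
--
--     for i in range(len(matrice[0])):
--         c = []
--         for j in range(len(matrice)):
--             c.append(matrice[j][i])
--         cols.append(c)
--
--     candidates = []
--
--     for index, i in enumerate(cols):
--         if operations[index] == '+':
--             candidates.append(sum([int(z) for z in i]))
--         else:
--             acc = 1
--             for j in i:
--                 acc = acc * int(j)
--             candidates.append(acc)
--
--     solution = sum(candidates)
--     return solution
-- ===== SOURCE B (Python) =====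
-- def part_1(matrice, operations):
--     ops = operations[:len(matrice[0])]
--     accs = [0 if op == '+' else 1 for op in ops]
--     for row in matrice:
--         accs = [a + int(v) if op == '+' else a * int(v)
--                 for (a, v, op) in zip(accs, row, ops)]
--     return sum(accs)
-- ===== Notes on version B (the rewrite author's own statement) =====
-- stated objective: alternative
-- what changed: B streams row-major over the matrix maintaining one running accumulator per column (initialized 0/1 by operation, updated via zip) instead of materializing the transposed columns and then reducing each column; no transpose, no candidates list.
import Mathlib
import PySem

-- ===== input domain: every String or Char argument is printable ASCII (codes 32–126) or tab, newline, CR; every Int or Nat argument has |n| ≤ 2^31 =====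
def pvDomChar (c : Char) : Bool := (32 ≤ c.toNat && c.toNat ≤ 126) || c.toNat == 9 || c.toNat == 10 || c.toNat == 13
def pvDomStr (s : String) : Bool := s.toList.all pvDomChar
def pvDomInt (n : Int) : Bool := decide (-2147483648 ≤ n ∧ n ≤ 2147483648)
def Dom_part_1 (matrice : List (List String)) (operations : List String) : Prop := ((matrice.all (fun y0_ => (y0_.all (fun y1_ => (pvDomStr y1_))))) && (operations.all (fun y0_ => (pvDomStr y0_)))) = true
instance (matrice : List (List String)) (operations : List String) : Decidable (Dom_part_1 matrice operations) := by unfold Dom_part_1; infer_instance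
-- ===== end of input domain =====

-- B replaces A's "materialize the transpose, reduce each column, sum the candidates" with a single
-- row-major streaming pass over per-column accumulators (same cost, O(cols) extra space instead of
-- a full transposed copy); equivalence of the return values is proved on Pre_ (where Python A returns).

-- ===== PORT A =====
def part_1 (matrice : List (List String)) (operations : List String) : Int :=
  let cols : List (List String) :=
    (PySem.List.pyRange 0 ((PySem.List.pyGetD matrice 0 []).length : Int) 1).foldl
      (fun cols i =>
        let c : List String :=
          (PySem.List.pyRange 0 (matrice.length : Int) 1).foldl
            (fun c j => c ++ [PySem.List.pyGetD (PySem.List.pyGetD matrice j []) i ""]) []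
        cols ++ [c]) []
  let candidates : List Int :=
    (PySem.List.enumerate cols).foldl
      (fun candidates p =>
        if PySem.List.pyGetD operations p.1 "" = "+" then
          candidates ++ [(p.2.map (fun z => (PySem.Int.ofStr? z).getD 0)).sum]
        else
          candidates ++ [p.2.foldl (fun acc j => acc * (PySem.Int.ofStr? j).getD 0) 1]) []
  candidates.sum

-- ===== PORT B =====
-- the zip-comprehension of Source B: update each column accumulator from its row entry and operation
def pvStepRow : List Int → List String → List String → List Int
  | a :: as, v :: vs, op :: ops =>
      (if op = "+" then a + (PySem.Int.ofStr? v).getD 0 else a * (PySem.Int.ofStr? v).getD 0)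
        :: pvStepRow as vs ops
  | _, _, _ => []

def part_1_alt (matrice : List (List String)) (operations : List String) : Int :=
  let ops := PySem.List.slice operations none (some ((PySem.List.pyGetD matrice 0 []).length : Int))
  let accs := ops.map (fun op => if op = "+" then (0 : Int) else 1)
  (matrice.foldl (fun accs row => pvStepRow accs row ops) accs).sum

-- ===== PRECONDITION & SPEC =====
-- Pre_ excludes exactly the inputs where Python A raises: the empty matrix (matrice[0] → IndexError),
-- fewer operations than columns (operations[index] → IndexError), a row shorter than the first row
-- (matrice[j][i] → IndexError), and non-int entries in the used columns (int(z) → ValueError).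
def Pre_part_1 (matrice : List (List String)) (operations : List String) : Prop :=
  matrice ≠ [] ∧
  (matrice.headD []).length ≤ operations.length ∧
  (∀ row ∈ matrice, (matrice.headD []).length ≤ row.length) ∧
  (∀ row ∈ matrice, ∀ z ∈ row.take (matrice.headD []).length, (PySem.Int.ofStr? z).isSome = true)
instance (matrice : List (List String)) (operations : List String) : Decidable (Pre_part_1 matrice operations) := by unfold Pre_part_1; infer_instance

def pvWitness_part_1 : List (List String) × List String := ([["1", "2"], ["-3", " 4 "]], ["+", "*"])

def Spec_part_1 (matrice : List (List String)) (operations : List String) (out : Int) : Prop := out = part_1_alt matrice operations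
instance (matrice : List (List String)) (operations : List String) (out : Int) : Decidable (Spec_part_1 matrice operations out) := by unfold Spec_part_1; infer_instance

-- ===== CLAIM (what is proved, stated in full; the proofs are below) =====
def Claim_equal_part_1 : Prop := ∀ (matrice : List (List String)) (operations : List String), Dom_part_1 matrice operations → Pre_part_1 matrice operations → Spec_part_1 matrice operations (part_1 matrice operations)

-- ===== LEMMAS AND PROOFS =====

-- proof-side abbreviations: the int() value of an entry and one column-accumulator step
def pvVal (z : String) : Int := (PySem.Int.ofStr? z).getD 0
def pvComb (op : String) (a v : Int) : Int := if op = "+" then a + v else a * v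
def pvColAcc (rows : List (List String)) (op : String) (k : Nat) (a : Int) : Int :=
  rows.foldl (fun a row => pvComb op a (pvVal (row.getD k ""))) a

lemma pv_map_getD_range {α : Type} (l : List α) (d : α) :
    (List.range l.length).map (fun k => l.getD k d) = l := by
  apply List.ext_getElem (by simp)
  intro k h1 h2
  simp [List.getD_eq_getElem?_getD, List.getElem?_eq_getElem h2]

lemma pvStepRow_length (accs : List Int) (row ops : List String) :
    (pvStepRow accs row ops).length = min accs.length (min row.length ops.length) := by
  induction accs generalizing row ops with
  | nil => simp [pvStepRow]
  | cons a as ih =>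
    cases row with
    | nil => simp [pvStepRow]
    | cons v vs =>
      cases ops with
      | nil => simp [pvStepRow]
      | cons op opss => simp [pvStepRow, ih]

lemma pvStepRow_getD (accs : List Int) (row ops : List String) (k : Nat)
    (hk : k < accs.length) (hr : k < row.length) (ho : k < ops.length) :
    (pvStepRow accs row ops).getD k 0
      = pvComb (ops.getD k "") (accs.getD k 0) (pvVal (row.getD k "")) := by
  induction accs generalizing row ops k with
  | nil => simp at hk
  | cons a as ih =>
    cases row with
    | nil => simp at hr
    | cons v vs =>
      cases ops with
      | nil => simp at ho
      | cons op opss =>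
        cases k with
        | zero => simp [pvStepRow, pvComb, pvVal]
        | succ k =>
          simp only [pvStepRow, List.getD_cons_succ]
          exact ih vs opss k (by simpa using hk) (by simpa using hr) (by simpa using ho)

-- B's streamed accumulators, characterized column-wise
lemma pvB_char (rows : List (List String)) (ops : List String) (accs : List Int)
    (hlen : accs.length = ops.length) (hrows : ∀ r ∈ rows, ops.length ≤ r.length) :
    rows.foldl (fun a r => pvStepRow a r ops) accs
      = (List.range ops.length).map (fun k => pvColAcc rows (ops.getD k "") k (accs.getD k 0)) := by
  induction rows generalizing accs with
  | nil =>
    simp only [List.foldl_nil, pvColAcc, ← hlen]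
    exact (pv_map_getD_range accs 0).symm
  | cons r rest ih =>
    have hr : ops.length ≤ r.length := hrows r (by simp)
    have hlen' : (pvStepRow accs r ops).length = ops.length := by
      rw [pvStepRow_length]; omega
    rw [List.foldl_cons, ih (pvStepRow accs r ops) hlen' (fun r hr => hrows r (by simp [hr]))]
    apply List.map_congr_left
    intro k hkr
    have hk : k < ops.length := List.mem_range.mp hkr
    rw [pvStepRow_getD accs r ops k (by omega) (by omega) hk]
    rfl

lemma pv_enum {α : Type} (f : Nat → α) : ∀ (n j : Nat),
    PySem.List.enumerate ((List.range' j n).map f) (j : Int)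
      = (List.range' j n).map (fun (k : Nat) => ((k : Int), f k)) := by
  intro n
  induction n with
  | zero => intro j; simp
  | succ n ih =>
    intro j
    rw [List.range'_succ]
    simp only [List.map_cons, PySem.List.enumerate_cons]
    have h1 : ((j : Int) + 1) = ((j + 1 : Nat) : Int) := by push_cast; ring
    rw [h1, ih (j + 1)]

lemma pv_enum_range {α : Type} (f : Nat → α) (n : Nat) :
    PySem.List.enumerate ((List.range n).map f) 0
      = (List.range n).map (fun (k : Nat) => ((k : Int), f k)) := by
  rw [List.range_eq_range']
  simpa using pv_enum f n 0

-- A's transpose-then-reduce result, characterized column-wise (holds unconditionally)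
lemma pvA_char (matrice : List (List String)) (operations : List String) :
    part_1 matrice operations =
      ((List.range (PySem.List.pyGetD matrice 0 []).length).map (fun k =>
        if operations.getD k "" = "+" then
          ((matrice.map (fun row => row.getD k "")).map pvVal).sum
        else
          (matrice.map (fun row => row.getD k "")).foldl (fun a z => a * pvVal z) 1)).sum := by
  simp only [part_1]
  rw [PySem.List.foldl_append_singleton_eq_map
    (f := fun i => (PySem.List.pyRange 0 (matrice.length : Int) 1).foldl
      (fun c j => c ++ [PySem.List.pyGetD (PySem.List.pyGetD matrice j []) i ""]) [])]
  have hinner : ∀ i : Int,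
      (PySem.List.pyRange 0 (matrice.length : Int) 1).foldl
        (fun c j => c ++ [PySem.List.pyGetD (PySem.List.pyGetD matrice j []) i ""]) []
      = matrice.map (fun row => PySem.List.pyGetD row i "") := by
    intro i
    rw [PySem.List.foldl_append_singleton_eq_map
      (f := fun j => PySem.List.pyGetD (PySem.List.pyGetD matrice j []) i "")]
    rw [List.nil_append]
    rw [show (fun j => PySem.List.pyGetD (PySem.List.pyGetD matrice j []) i "")
        = (fun row => PySem.List.pyGetD row i "") ∘ (fun j => PySem.List.pyGetD matrice j []) from rfl]
    rw [← List.map_map, PySem.List.map_pyGetD_pyRange_zero']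
  simp only [hinner, List.nil_append]
  have hstep : (fun (cand : List Int) (p : Int × List String) =>
      if PySem.List.pyGetD operations p.1 "" = "+" then
        cand ++ [(p.2.map (fun z => (PySem.Int.ofStr? z).getD 0)).sum]
      else
        cand ++ [p.2.foldl (fun acc j => acc * (PySem.Int.ofStr? j).getD 0) 1])
      = fun cand p => cand ++ [if PySem.List.pyGetD operations p.1 "" = "+" then
          (p.2.map (fun z => (PySem.Int.ofStr? z).getD 0)).sum
        else p.2.foldl (fun acc j => acc * (PySem.Int.ofStr? j).getD 0) 1] := by
    funext c p; split <;> rfl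
  rw [hstep, PySem.List.foldl_append_singleton_eq_map, List.nil_append]
  rw [PySem.List.pyRange_zero_nat, List.map_map]
  rw [pv_enum_range, List.map_map]
  apply congrArg
  apply List.map_congr_left
  intro k hk
  simp only [Function.comp_apply, PySem.List.pyGetD_natCast]
  rfl

theorem pv_main (matrice : List (List String)) (operations : List String)
    (h1 : matrice ≠ [])
    (h2 : (matrice.headD []).length ≤ operations.length)
    (h3 : ∀ row ∈ matrice, (matrice.headD []).length ≤ row.length) :
    part_1 matrice operations = part_1_alt matrice operations := by
  have hn : PySem.List.pyGetD matrice 0 [] = matrice.headD [] := by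
    cases matrice with
    | nil => simp [PySem.List.pyGetD_zero]
    | cons r rs => simp [PySem.List.pyGetD_zero]
  set n := (matrice.headD []).length with hndef
  have hops : (PySem.List.slice operations none (some ((PySem.List.pyGetD matrice 0 []).length : Int)))
      = operations.take n := by rw [hn, PySem.List.slice_to_natCast]
  have htklen : (operations.take n).length = n := by
    rw [List.length_take]; omega
  simp only [part_1_alt, hops]
  rw [pvB_char matrice (operations.take n)
    ((operations.take n).map (fun op => if op = "+" then (0 : Int) else 1))
    (by simp)
    (by intro r hr; rw [htklen]; exact h3 r hr)]
  rw [pvA_char, hn, htklen]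
  apply congrArg
  apply List.map_congr_left
  intro k hk
  have hkn : k < n := List.mem_range.mp hk
  have hkops : k < operations.length := by omega
  have htk : (operations.take n).getD k "" = operations.getD k "" := by
    simp [List.getD_eq_getElem?_getD, hkn]
  have hik : ((operations.take n).map (fun op => if op = "+" then (0 : Int) else 1)).getD k 0
      = if operations.getD k "" = "+" then (0 : Int) else 1 := by
    simp [List.getD_eq_getElem?_getD, hkn, List.getElem?_eq_getElem hkops]
  rw [htk, hik]
  by_cases h : operations.getD k "" = "+"
  · simp only [h]
    simp [pvColAcc, pvComb, List.map_map, Function.comp_def]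
    rw [PySem.List.foldl_add matrice (fun x => pvVal (x[k]?.getD "")) 0, zero_add]
  · simp only [if_neg h]
    simp only [pvColAcc, pvComb, if_neg h]
    rw [List.foldl_map]

-- ===== VERDICT (by name: the statement is the Claim_ definition above) =====
theorem part_1_spec : Claim_equal_part_1 := by
  intro matrice operations _ hpre
  obtain ⟨h1, h2, h3, _⟩ := hpre
  show part_1 matrice operations = part_1_alt matrice operations
  exact pv_main matrice operations h1 h2 h3
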